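-- pv_equiv track=rewrite | github.com/mima3/qiita_exporter | qiita_to_wp.py | fix_titlemiss
-- ===== SOURCE A (Python) =====
-- def fix_titlemiss(line):
--     """タイトルタグのスペースの入れ忘れを修正します."""
--     if not line:
--         return line
--     if line[0] != '#':
--         return line
--     if "# " in line:
--         return line
--     # #から開始しているが、スペースで区切られていない
--     result = ''
--     sts = 0
--     for s in line:
--         if sts == 0 and s != '#':
--             # #の後にスペースを挿入
--             sts = 1
--             result += " "
--         result += s
--     return result
-- ===== SOURCE B (Python) =====
-- def fix_titlemiss(line):
--     """タイトルタグのスペースの入れ忘れを修正します."""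
--     if not line or line[0] != '#' or "# " in line:
--         return line
--     i = len(line) - len(line.lstrip('#'))
--     if i == len(line):
--         return line
--     return line[:i] + ' ' + line[i:]
-- ===== Notes on version B (the rewrite author's own statement) =====
-- stated objective: simpler
-- what changed: Replaced A's stateful character-accumulation loop (state flag sts, result built char by char) with an arithmetic split point via line.lstrip('#') and a single slice concatenation.
import Mathlib
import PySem

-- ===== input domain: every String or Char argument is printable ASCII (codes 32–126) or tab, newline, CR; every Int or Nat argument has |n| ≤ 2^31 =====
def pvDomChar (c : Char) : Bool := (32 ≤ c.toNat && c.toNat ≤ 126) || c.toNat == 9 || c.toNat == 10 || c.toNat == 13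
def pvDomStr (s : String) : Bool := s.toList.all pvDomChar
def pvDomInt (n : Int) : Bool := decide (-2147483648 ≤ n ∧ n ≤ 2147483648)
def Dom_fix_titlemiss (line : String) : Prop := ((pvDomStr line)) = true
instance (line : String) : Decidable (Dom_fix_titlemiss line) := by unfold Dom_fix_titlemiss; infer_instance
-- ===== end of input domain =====

-- B replaces A's stateful character-accumulation loop by an arithmetic split point
-- (len(line) - len(line.lstrip('#'))) and slicing; objective: simpler, no speed claim.

-- ===== PORT A =====
-- A's loop: 'for s in line' with state sts and accumulator result.
def fixLoopA : Nat → List Char → List Char → List Char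
  | _,   acc, []        => acc
  | sts, acc, s :: rest =>
    if sts = 0 ∧ s ≠ '#' then fixLoopA 1 (acc ++ [' ', s]) rest
    else fixLoopA sts (acc ++ [s]) rest

def fix_titlemiss (line : String) : String :=
  if line = "" then line
  else if PySem.Str.pyGet? line 0 ≠ some '#' then line
  else if PySem.Str.isIn "# " line then line
  else String.ofList (fixLoopA 0 [] line.toList)

-- ===== PORT B =====
-- line.lstrip('#') on a str is dropWhile (· == '#') on the char list (exact);
-- line[:i] / line[i:] with 0 ≤ i ≤ len are List.take / List.drop (exact on that range).
def fix_titlemiss_alt (line : String) : String :=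
  if line = "" then line
  else if PySem.Str.pyGet? line 0 ≠ some '#' then line
  else if PySem.Str.isIn "# " line then line
  else
    let l := line.toList
    let i := l.length - (l.dropWhile (· == '#')).length
    if i = l.length then line
    else String.ofList (l.take i ++ ' ' :: l.drop i)

-- ===== PRECONDITION & SPEC =====
def Spec_fix_titlemiss (line : String) (out : String) : Prop := out = fix_titlemiss_alt line
instance (line : String) (out : String) : Decidable (Spec_fix_titlemiss line out) := by unfold Spec_fix_titlemiss; infer_instance

-- ===== CLAIM (what is proved, stated in full; the proofs are below) =====
def Claim_equal_fix_titlemiss : Prop := ∀ (line : String), Dom_fix_titlemiss line → Spec_fix_titlemiss line (fix_titlemiss line)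

-- ===== LEMMAS AND PROOFS =====

theorem fixLoopA_one (l acc : List Char) : fixLoopA 1 acc l = acc ++ l := by
  induction l generalizing acc with
  | nil => simp [fixLoopA]
  | cons s rest ih => simp [fixLoopA, ih]

theorem fixLoopA_zero (l acc : List Char) :
    fixLoopA 0 acc l =
      acc ++ l.takeWhile (· == '#') ++
        (match l.dropWhile (· == '#') with
         | [] => []
         | r  => ' ' :: r) := by
  induction l generalizing acc with
  | nil => simp [fixLoopA]
  | cons s rest ih =>
    by_cases hs : s = '#'
    · subst hs
      simp only [fixLoopA, List.takeWhile_cons, List.dropWhile_cons]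
      simp [ih]
    · simp only [fixLoopA, List.takeWhile_cons, List.dropWhile_cons]
      simp [hs, fixLoopA_one]

-- ===== VERDICT (by name: the statement is the Claim_ definition above) =====
theorem fix_titlemiss_spec : Claim_equal_fix_titlemiss := by
  unfold Claim_equal_fix_titlemiss Spec_fix_titlemiss
  intro line _
  unfold fix_titlemiss fix_titlemiss_alt
  split_ifs with h1 h2 h3 <;> try rfl
  simp only []
  rw [fixLoopA_zero, List.nil_append]
  set l := line.toList with hl
  set tw := l.takeWhile (· == '#') with htw
  set dw := l.dropWhile (· == '#') with hdw
  have hsplit : tw ++ dw = l := by rw [htw, hdw]; exact List.takeWhile_append_dropWhile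
  have hlen : tw.length + dw.length = l.length := by
    rw [← hsplit]; simp
  have hi : l.length - dw.length = tw.length := by omega
  rw [hi]
  by_cases hnil : dw = []
  · have : tw = l := by simpa [hnil] using hsplit
    rw [hnil, this]
    simp [hl, String.ofList_toList]
  · have hdpos : 0 < dw.length := List.length_pos_of_ne_nil hnil
    have hne : tw.length ≠ l.length := by omega
    rw [if_neg hne]
    have htake : l.take tw.length = tw := by
      rw [← hsplit]; exact List.take_left ..
    have hdrop : l.drop tw.length = dw := by
      rw [← hsplit]; exact List.drop_left ..
    rw [htake, hdrop]
    rcases dw with _ | ⟨a, r⟩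
    · exact absurd rfl hnil
    · rfl
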